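-- pv_equiv track=rewrite | github.com/com3dian/nomodetect | utils.py | lineSetGetRange
-- ===== SOURCE A (Python) =====
-- def lineSetGetRange(lineList):
--     '''
--     from line list get a rectangle range around those lines
--
--
--     |----------------|  - borderUpper
--     |                |
--     |----------------|  - borderLower
--
--     |                |
--     borderLeft       borderRight
--     ------------------------
--     lineList: list, list of lines
--
--     return:
--     '''
--
--     borderLeft, borderRight, borderUpper, borderLower = lineList[0][0], lineList[0][2], lineList[0][1], lineList[0][3]
--     for line in lineList:
--         x1, y1, x2, y2 = line
--         if min(x1, x2) < borderLeft:
--             borderLeft = min(x1, x2)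
--         if max(x1, x2) > borderRight:
--             borderRight = max(x1, x2)
--         if min(y1, y2) < borderUpper:
--             borderUpper = min(y1, y2)
--         if max(y1, y2) > borderLower:
--             borderLower = max(y1, y2)
--     return borderLeft, borderRight, borderUpper, borderLower
-- ===== SOURCE B (Python) =====
-- def lineSetGetRange(lineList):
--     xs = [c for l in lineList for c in (l[0], l[2])]
--     ys = [c for l in lineList for c in (l[1], l[3])]
--     return min(xs), max(xs), min(ys), max(ys)
-- ===== Notes on version B (the rewrite author's own statement) =====
-- stated objective: simpler
-- what changed: Replaced the fused loop maintaining four running extrema (seeded from the first line and conditionally updated) by collecting all x- and y-coordinates into two flat lists and reducing each with min/max.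
-- outside the precondition, e.g. on lineSetGetRange([]): A raises IndexError, B raises ValueError
import Mathlib
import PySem

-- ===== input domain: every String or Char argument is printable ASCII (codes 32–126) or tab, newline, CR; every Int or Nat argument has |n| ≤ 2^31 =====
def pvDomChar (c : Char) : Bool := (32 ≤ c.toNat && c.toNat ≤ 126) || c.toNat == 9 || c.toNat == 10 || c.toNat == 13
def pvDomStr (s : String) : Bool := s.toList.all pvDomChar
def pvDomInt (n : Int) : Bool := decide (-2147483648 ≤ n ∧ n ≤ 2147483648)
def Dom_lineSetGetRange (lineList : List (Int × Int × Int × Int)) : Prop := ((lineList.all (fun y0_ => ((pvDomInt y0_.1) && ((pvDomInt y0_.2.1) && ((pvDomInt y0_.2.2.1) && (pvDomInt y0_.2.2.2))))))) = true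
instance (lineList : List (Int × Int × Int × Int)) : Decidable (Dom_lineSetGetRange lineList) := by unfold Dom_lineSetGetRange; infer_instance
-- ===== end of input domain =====

-- B replaces A's fused running-extrema loop by collecting all x/y coordinates into two
-- flat lists and reducing each with min/max (objective: simpler decomposition).


-- ===== PORT A =====
def lineSetGetRange (lineList : List (Int × Int × Int × Int)) : Int × Int × Int × Int :=
  match lineList with
  | [] => (0, 0, 0, 0)  -- Python raises IndexError on lineList[0]; excluded by Pre_
  | (x0, y0, x0', y0') :: _ =>
    lineList.foldl (fun st line =>
      let bl := if min line.1 line.2.2.1 < st.1 then min line.1 line.2.2.1 else st.1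
      let br := if max line.1 line.2.2.1 > st.2.1 then max line.1 line.2.2.1 else st.2.1
      let bu := if min line.2.1 line.2.2.2 < st.2.2.1 then min line.2.1 line.2.2.2 else st.2.2.1
      let blo := if max line.2.1 line.2.2.2 > st.2.2.2 then max line.2.1 line.2.2.2 else st.2.2.2
      (bl, br, bu, blo)) (x0, x0', y0, y0')

-- ===== PORT B =====
def lineSetGetRange_alt (lineList : List (Int × Int × Int × Int)) : Int × Int × Int × Int :=
  let xs := lineList.flatMap (fun l => [l.1, l.2.2.1])
  let ys := lineList.flatMap (fun l => [l.2.1, l.2.2.2])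
  match PySem.List.min? xs (fun v => v), PySem.List.max? xs (fun v => v),
        PySem.List.min? ys (fun v => v), PySem.List.max? ys (fun v => v) with
  | some a, some b, some c, some d => (a, b, c, d)
  | _, _, _, _ => (0, 0, 0, 0)  -- Python min([]) raises ValueError; excluded by Pre_

-- ===== PRECONDITION & SPEC =====
-- A raises IndexError (and B ValueError) on the empty list; Pre_ excludes exactly that input.
def Pre_lineSetGetRange (lineList : List (Int × Int × Int × Int)) : Prop := lineList ≠ []
instance (lineList : List (Int × Int × Int × Int)) : Decidable (Pre_lineSetGetRange lineList) := by unfold Pre_lineSetGetRange; infer_instance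
def pvWitness_lineSetGetRange : (List (Int × Int × Int × Int)) := [(1, 2, 3, 4), (0, 7, -2, 5)]

def Spec_lineSetGetRange (lineList : List (Int × Int × Int × Int)) (out : Int × Int × Int × Int) : Prop := out = lineSetGetRange_alt lineList
instance (lineList : List (Int × Int × Int × Int)) (out : Int × Int × Int × Int) : Decidable (Spec_lineSetGetRange lineList out) := by unfold Spec_lineSetGetRange; infer_instance

-- ===== CLAIM (what is proved, stated in full; the proofs are below) =====
def Claim_equal_lineSetGetRange : Prop := ∀ (lineList : List (Int × Int × Int × Int)), Dom_lineSetGetRange lineList → Pre_lineSetGetRange lineList → Spec_lineSetGetRange lineList (lineSetGetRange lineList)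

-- ===== LEMMAS AND PROOFS =====

-- A's conditional updates are min/max steps, so A's fused fold splits into four independent folds.
theorem foldA_split (t : List (Int × Int × Int × Int)) (bl br bu blo : Int) :
    t.foldl (fun st line =>
      let bl := if min line.1 line.2.2.1 < st.1 then min line.1 line.2.2.1 else st.1
      let br := if max line.1 line.2.2.1 > st.2.1 then max line.1 line.2.2.1 else st.2.1
      let bu := if min line.2.1 line.2.2.2 < st.2.2.1 then min line.2.1 line.2.2.2 else st.2.2.1
      let blo := if max line.2.1 line.2.2.2 > st.2.2.2 then max line.2.1 line.2.2.2 else st.2.2.2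
      ((bl, br, bu, blo) : Int × Int × Int × Int)) (bl, br, bu, blo)
    = (t.foldl (fun m p => min m (min p.1 p.2.2.1)) bl,
       t.foldl (fun m p => max m (max p.1 p.2.2.1)) br,
       t.foldl (fun m p => min m (min p.2.1 p.2.2.2)) bu,
       t.foldl (fun m p => max m (max p.2.1 p.2.2.2)) blo) := by
  induction t generalizing bl br bu blo with
  | nil => rfl
  | cons p t ih =>
    obtain ⟨p1, p2, p3, p4⟩ := p
    simp only [List.foldl_cons]
    rw [ih]
    have e1 : (if min p1 p3 < bl then min p1 p3 else bl) = min bl (min p1 p3) := by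
      split_ifs <;> omega
    have e2 : (if max p1 p3 > br then max p1 p3 else br) = max br (max p1 p3) := by
      split_ifs <;> omega
    have e3 : (if min p2 p4 < bu then min p2 p4 else bu) = min bu (min p2 p4) := by
      split_ifs <;> omega
    have e4 : (if max p2 p4 > blo then max p2 p4 else blo) = max blo (max p2 p4) := by
      split_ifs <;> omega
    rw [e1, e2, e3, e4]

-- Folding a binary-associative op over the flattened pair list equals the fused fold.
theorem foldl_flat_pair (k : Int → Int → Int)
    (hk : ∀ a b c : Int, k (k a b) c = k a (k b c))
    (f g : (Int × Int × Int × Int) → Int)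
    (t : List (Int × Int × Int × Int)) (m : Int) :
    (t.flatMap (fun p => [f p, g p])).foldl k m
      = t.foldl (fun m p => k m (k (f p) (g p))) m := by
  induction t generalizing m with
  | nil => rfl
  | cons p t ih => simp only [List.flatMap_cons, List.foldl, List.foldl_cons,
      List.cons_append, List.nil_append] at *; rw [ih, hk]

theorem lineSetGetRange_eq_alt (lineList : List (Int × Int × Int × Int))
    (h : lineList ≠ []) : lineSetGetRange lineList = lineSetGetRange_alt lineList := by
  match lineList with
  | [] => exact absurd rfl h
  | (a, b, c, d) :: t =>
    show (((a,b,c,d) :: t).foldl _ (a, c, b, d)) = _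
    rw [foldA_split]
    simp only [lineSetGetRange_alt, List.flatMap_cons, List.cons_append, List.nil_append]
    rw [PySem.List.min?_id_cons, PySem.List.max?_id_cons, PySem.List.min?_id_cons,
        PySem.List.max?_id_cons]
    simp only [List.foldl_cons]
    rw [foldl_flat_pair _ min_assoc, foldl_flat_pair _ max_assoc,
        foldl_flat_pair _ min_assoc, foldl_flat_pair _ max_assoc]
    have m1 : min a (min a c) = min a c := by omega
    have m2 : max c (max a c) = max a c := by omega
    have m3 : min b (min b d) = min b d := by omega
    have m4 : max d (max b d) = max b d := by omega
    rw [m1, m2, m3, m4]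

-- ===== VERDICT (by name: the statement is the Claim_ definition above) =====
theorem lineSetGetRange_spec : Claim_equal_lineSetGetRange := by
  intro lineList _ hpre
  unfold Spec_lineSetGetRange
  exact lineSetGetRange_eq_alt lineList hpre
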